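/- GENERATED by mk_final_copies.py from the proof of the farm's unit `imdct_step3_inner_r_loop.3` (farm:imdct_step3_inner_r_loop.3.1: Proof.lean) as the
   re-elaboration sweep compiled it — do not edit. -/
import Asan.CheckWalk
import Vorbis.Spec.Units.imdct_step3_inner_r_loop_3
open X86 X86.User Asan Vorbis Vorbis.Spec

set_option maxRecDepth 4000
set_option maxHeartbeats 4000000

namespace Vorbis.Spec.imdct_step3_inner_r_loop_3

/-- The memory at the exit of the segment (`loop1`, 0x105af9), as the walker leaves it: the entry memory of the segment under
twelve pushed return addresses (at `rsp − 8`), the float scratch slots `[rsp + 0CH, rsp + 1CH)` and the eight stores into the two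
runs `e0[−7 .. −4]`, `e2[−7 .. −4]`. What the exit assertion needs of it: the seven frame slots, the spilled `k1`, the footprint
and the untouched shadow. The stored values are arbitrary (`y…`). -/
theorem exit_mem (ue v s : State) (len i0 koff k1 t : Nat) (ret : Word)
    (y1 y2 y3 y4 y5 y6 y7 y8 y9 y10 y11 y12 y13 y14 y15 y16 y17 y18 y19 y20 y21 y22 y23 y24 : Nat)
    (he_room : 7340032 + 112 ≤ (ue.reg .rsp).toNat)
    (he_top : (ue.reg .rsp).toNat + 8 ≤ 8388608)
    (hwe1 : 1154368 ≤ (ue.reg .rsi).toNat)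
    (hwe2 : (ue.reg .rsi).toNat + 4 * len ≤ 12582912)
    (hwe3 : (ue.reg .rsp).toNat + 8 ≤ (ue.reg .rsi).toNat ∨
      (ue.reg .rsi).toNat + 4 * len ≤ (ue.reg .rsp).toNat - 112)
    (htlt : t < quarter ue)
    (hhi : i0 < len)
    (hlo : koff + 8 * quarter ue ≤ i0 + 1)
    (hk0 : 1 ≤ koff)
    (he0 : (v.reg .r12).toNat + 32 * t = (ue.reg .rsi).toNat + 4 * i0)
    (he2 : (v.reg .rbp).toNat + 32 * t + 4 * koff = (ue.reg .rsi).toNat + 4 * i0)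
    (hsame : Mem.SameExcept
      [⟨(ue.reg .rsp).toNat - 112, (ue.reg .rsp).toNat⟩,
       ⟨(ue.reg .rsi).toNat + 4 * (i0 + 1 - 8 * quarter ue), (ue.reg .rsi).toNat + 4 * (i0 + 1)⟩,
       ⟨(ue.reg .rsi).toNat + 4 * (i0 + 1 - koff - 8 * quarter ue), (ue.reg .rsi).toNat + 4 * (i0 + 1 - koff)⟩]
      ue.mem v.mem)
    (hshadow : Mem.EqOn 12582912 14680064 ue.mem v.mem)
    (sret : UInt64.ofNat (v.mem.readLE (ue.reg .rsp) 8) = ret)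
    (s15 : UInt64.ofNat (v.mem.readLE (ue.reg .rsp - 8) 8) = ue.reg .r15)
    (s14 : UInt64.ofNat (v.mem.readLE (ue.reg .rsp - 16) 8) = ue.reg .r14)
    (s13 : UInt64.ofNat (v.mem.readLE (ue.reg .rsp - 24) 8) = ue.reg .r13)
    (s12 : UInt64.ofNat (v.mem.readLE (ue.reg .rsp - 32) 8) = ue.reg .r12)
    (sbp : UInt64.ofNat (v.mem.readLE (ue.reg .rsp - 40) 8) = ue.reg .rbp)
    (sbx : UInt64.ofNat (v.mem.readLE (ue.reg .rsp - 48) 8) = ue.reg .rbx)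
    (hk1slot : v.mem.readLE (ue.reg .rsp - 60) 4 = k1)
    (w_mem : s.mem =
      ((((((((((((((((((((((((v.mem.writeLE (ue.reg .rsp - 96) 8 y1).writeLE (ue.reg .rsp - 76) 4 y2).writeLE (ue.reg .rsp - 96) 8 y3).writeLE
         (ue.reg .rsp - 68) 4 y4).writeLE (ue.reg .rsp - 72) 4 y5).writeLE (ue.reg .rsp - 96) 8 y6).writeLE
         (ue.reg .rsp - 64) 4 y7).writeLE (v.reg .r12 - 16) 4 y8).writeLE (v.reg .r12 - 20) 4 y9).writeLE
         (ue.reg .rsp - 96) 8 y10).writeLE (v.reg .rbp - 16) 4 y11).writeLE (v.reg .rbp - 20) 4 y12).writeLE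
         (ue.reg .rsp - 96) 8 y13).writeLE (ue.reg .rsp - 76) 4 y14).writeLE (ue.reg .rsp - 96) 8 y15).writeLE
         (ue.reg .rsp - 68) 4 y16).writeLE (ue.reg .rsp - 72) 4 y17).writeLE (ue.reg .rsp - 96) 8 y18).writeLE
         (ue.reg .rsp - 64) 4 y19).writeLE (v.reg .r12 - 24) 4 y20).writeLE (v.reg .r12 - 28) 4 y21).writeLE
         (ue.reg .rsp - 96) 8 y22).writeLE (v.reg .rbp - 24) 4 y23).writeLE (v.reg .rbp - 28) 4 y24)
        ) :
    (UInt64.ofNat (s.mem.readLE (ue.reg .rsp) 8) = ret ∧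
      UInt64.ofNat (s.mem.readLE (ue.reg .rsp - 8) 8) = ue.reg .r15 ∧
      UInt64.ofNat (s.mem.readLE (ue.reg .rsp - 16) 8) = ue.reg .r14 ∧
      UInt64.ofNat (s.mem.readLE (ue.reg .rsp - 24) 8) = ue.reg .r13 ∧
      UInt64.ofNat (s.mem.readLE (ue.reg .rsp - 32) 8) = ue.reg .r12 ∧
      UInt64.ofNat (s.mem.readLE (ue.reg .rsp - 40) 8) = ue.reg .rbp ∧
      UInt64.ofNat (s.mem.readLE (ue.reg .rsp - 48) 8) = ue.reg .rbx) ∧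
    s.mem.readLE (ue.reg .rsp - 60) 4 = k1 ∧
    Mem.SameExcept
      [⟨(ue.reg .rsp).toNat - 112, (ue.reg .rsp).toNat⟩,
       ⟨(ue.reg .rsi).toNat + 4 * (i0 + 1 - 8 * quarter ue), (ue.reg .rsi).toNat + 4 * (i0 + 1)⟩,
       ⟨(ue.reg .rsi).toNat + 4 * (i0 + 1 - koff - 8 * quarter ue), (ue.reg .rsi).toNat + 4 * (i0 + 1 - koff)⟩]
      ue.mem s.mem ∧
    ShadowUntouched ue.mem s.mem := by
  -- the stack window of the frame slots is untouched by the segment's stores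
  have hstk : Mem.EqOn ((ue.reg .rsp).toNat - 60) ((ue.reg .rsp).toNat + 8) v.mem s.mem := by
    u_memnorm
    u_eqon
  refine ⟨⟨?_, ?_, ?_, ?_, ?_, ?_, ?_⟩, ?_, ?_, ?_⟩
  · -- the return address
    exact Mem.ofNat_readLE_frame sret (hstk.mono (by u_omega) (by u_omega)) (by u_omega)
  · -- the saved r15
    exact Mem.ofNat_readLE_frame s15 (hstk.mono (by u_omega) (by u_omega)) (by u_omega)
  · -- the saved r14
    exact Mem.ofNat_readLE_frame s14 (hstk.mono (by u_omega) (by u_omega)) (by u_omega)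
  · -- the saved r13
    exact Mem.ofNat_readLE_frame s13 (hstk.mono (by u_omega) (by u_omega)) (by u_omega)
  · -- the saved r12
    exact Mem.ofNat_readLE_frame s12 (hstk.mono (by u_omega) (by u_omega)) (by u_omega)
  · -- the saved rbp
    exact Mem.ofNat_readLE_frame sbp (hstk.mono (by u_omega) (by u_omega)) (by u_omega)
  · -- the saved rbx
    exact Mem.ofNat_readLE_frame sbx (hstk.mono (by u_omega) (by u_omega)) (by u_omega)
  · -- the spilled `k1`
    exact Mem.readLE_frame hk1slot (hstk.mono (by u_omega) (by u_omega)) (by u_omega)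
  · -- the footprint: every store is in the frame or in one of the two runs
    u_same
  · -- no store went to the shadow
    unfold Asan.ShadowUntouched
    u_memnorm
    u_eqon

/-- `sub r15d, 1` (0x105af5, C line 2488 `--i`): the counter `m − t` of a running iteration (`t < m`) becomes `m − (t + 1)`; the
upper half of r15 stays 0. -/
theorem exit_cnt (ue v s : State) (t : Nat) (hn31 : arg32 ue .rdi < 2 ^ 31)
    (hcnt : (v.reg .r15).toNat = quarter ue - t) (htlt : t < quarter ue)
    (w_r15 : s.reg .r15 = Word.ofBV (Word.part .w32 (v.reg .r15) - 1#32)) :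
    (s.reg .r15).toNat = quarter ue - (t + 1) := by
  have hq : quarter ue < 2 ^ 29 := by
    rw [quarter_def]
    rw [arg32_def] at hn31
    omega
  rw [w_r15, Vorbis.toNat_ofBV32, BitVec.toNat_sub, Vorbis.toNat_part32]
  simp only [BitVec.toNat_ofNat]
  omega

end Vorbis.Spec.imdct_step3_inner_r_loop_3

/-- Segment 3 of `imdct_step3_inner_r_loop` (`cut2` 0x10592b … `loop1` 0x105af9: quarters 2 and 3 of the body, C lines 2507–2526, and
`--i` of line 2488): from the assertion `AtMid` (two quarters of iteration `t` done) to the loop head's `AtHead` with `t + 1`.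
Twelve `load4` checks: eight on `e0[−4 .. −7]`, `e2[−4 .. −7]` (inside the live buffer `e[0 .. len)` by `PairDown`), four on
`A[k1 (4 t + j) + d]`, `j = 2, 3`, `d ≤ 1` (inside the live twiddle table by `Mdct.RLoop.A`); the eight stores go to addresses
checked before. THE WALK IS DONE IN THIRTEEN STAGES, one per check call, with `clear w_zmm` between them: after a check call the
walker tracks the vector registers (`w_zmm`), and every SSE write DOUBLES that term (as a tree); `u_clear_stale` traverses it
without a cache, so one walk over the ~60 SSE instructions of the segment does not end. The exit's memory facts are
`exit_mem`, the counter is `exit_cnt`. -/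
theorem Vorbis.Spec.Worked.imdct_step3_inner_r_loop_3_ok : Vorbis.Spec.imdct_step3_inner_r_loop_3.Statement := by
  intro Lay hLay μ hμ u₀ hcode hload4 others frames len i0 koff k1 ue ret t v hv
  obtain ⟨hrip, hloop, htlt, hr13⟩ := hv
  obtain ⟨hbody, hle, hcnt, he0, he2, hA, hk1slot⟩ := hloop
  obtain ⟨he, hpre, hcodeok, habi, hframe, hsame, hshadow⟩ := hbody
  obtain ⟨hrsp, sret, s15, s14, s13, s12, sbp, sbx⟩ := hframe
  have he0' := he
  have hpre0 := hpre
  v_entry he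
  obtain ⟨hsh, hn31, hi0, hneg, hk1, hk31, hpair, hlive, hAlive⟩ := hpre
  have hdf := habi.1
  have hmx := habi.2
  have hsse : SseOK v := sseOK_of_abiInv habi
  -- the present state under the walker's names; where the buffer `e` and the table `A` are, as arithmetic
  have w_rsp := hrsp
  have hsp := hsh.rsp
  have hhi := hpair.hi
  have hlo := hpair.lo
  have hk0 := hneg.1
  have hwe := hlive.where_ hsh.inv hsh.offText (by omega) (by omega)
  have hAl := hAlive (by omega)
  have hwA := (hAl.where_ hsh.inv hsh.offText (by omega) (by omega))
  obtain ⟨hwA1, hwA2, -⟩ := hwA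
  obtain ⟨hwe1, hwe2, hwe3⟩ := hwe
  have hwe3' : (ue.reg .rsp).toNat + 8 ≤ (ue.reg .rsi).toNat ∨
      (ue.reg .rsi).toNat + 4 * len ≤ (ue.reg .rsp).toNat - 112 := by
    omega
  clear hwe3
  have h12 : (ue.reg .rsi).toNat + 32 ≤ (v.reg .r12).toNat ∧ (v.reg .r12).toNat + 4 ≤ (ue.reg .rsi).toNat + 4 * len := by
    omega
  have hbp : (ue.reg .rsi).toNat + 28 ≤ (v.reg .rbp).toNat ∧ (v.reg .rbp).toNat + 4 ≤ (v.reg .r12).toNat := by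
    omega
  -- the twiddle reads of quarters 2 and 3 stay inside `A[0 .. k1 (4 m - 1) + 1]`; the products as atoms for `omega`
  have hAq2 := Mdct.RLoop.A (k1 := k1) (j := 2) (d := 1) htlt (by omega) (by omega)
  have hAq3 := Mdct.RLoop.A (k1 := k1) (j := 3) (d := 1) htlt (by omega) (by omega)
  have hmul3 : k1 * (4 * t + 3) = k1 * (4 * t + 2) + k1 := by
    rw [show 4 * t + 3 = (4 * t + 2) + 1 from rfl, Nat.mul_add, Nat.mul_one]
  have hmul4 : k1 * (4 * (t + 1) + 0) = k1 * (4 * t + 2) + k1 + k1 := by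
    rw [show 4 * (t + 1) + 0 = (4 * t + 2) + 1 + 1 by omega, Nat.mul_add, Nat.mul_add, Nat.mul_one]
  -- the carried footprint as a literal list, the carried shadow fact as the `Mem.EqOn` the frame tactics look for
  simp only [X86.User.Spec.footprint, imdct_step3_inner_r_loop.spec_frame, imdct_step3_inner_r_loop.spec_writes] at hsame
  unfold Asan.ShadowUntouched at hshadow
  -- 0x105930 chk13: `e0[-4]` = `[r12 - 10H]`, C line 2507 `k00_20 = e0[-4] - e2[-4]`; the walk stops at `ret13`
  u_walk hcode [hμ.vendor] until [Vorbis.L.imdct_step3_inner_r_loop.ret13] span [Vorbis.L.textLo, Vorbis.L.textHi] side (v_side)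
  · have hun : ShadowUntouched ue.mem s_105930.mem := by v_untouched
    exact hlive.accSmall hsh.inv hun _ 4 (by decide) (by u_omega) (by u_omega)
  try clear w_zmm
  -- 0x105946 chk14: `e2[-4]` = `[rbp - 10H]`, C line 2507; the walk stops at `ret14`
  u_walk hcode [hμ.vendor] until [Vorbis.L.imdct_step3_inner_r_loop.ret14] span [Vorbis.L.textLo, Vorbis.L.textHi] side (v_side)
  · have hun : ShadowUntouched ue.mem s_105946.mem := by v_untouched
    exact hlive.accSmall hsh.inv hun _ 4 (by decide) (by u_omega) (by u_omega)
  try clear w_zmm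
  -- 0x10596b chk15: `e0[-5]` = `[r12 - 14H]`, C line 2508 `k01_21 = e0[-5] - e2[-5]`; the walk stops at `ret15`
  u_walk hcode [hμ.vendor] until [Vorbis.L.imdct_step3_inner_r_loop.ret15] span [Vorbis.L.textLo, Vorbis.L.textHi] side (v_side)
  · have hun : ShadowUntouched ue.mem s_10596b.mem := by v_untouched
    exact hlive.accSmall hsh.inv hun _ 4 (by decide) (by u_omega) (by u_omega)
  try clear w_zmm
  -- 0x105979 chk16: `e2[-5]` = `[rbp - 14H]`, C line 2508; the walk stops at `ret16`
  u_walk hcode [hμ.vendor] until [Vorbis.L.imdct_step3_inner_r_loop.ret16] span [Vorbis.L.textLo, Vorbis.L.textHi] side (v_side)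
  · have hun : ShadowUntouched ue.mem s_105979.mem := by v_untouched
    exact hlive.accSmall hsh.inv hun _ 4 (by decide) (by u_omega) (by u_omega)
  try clear w_zmm
  -- the stores `e0[-4]`, `e0[-5]` (C lines 2509, 2510), then 0x1059b5 chk17: `A[0]` = `[rbx]`, C line 2511 `e2[-4] = k00_20 * A[0] - k01_21 * A[1]`; the walk stops at `ret17`
  u_walk hcode [hμ.vendor] until [Vorbis.L.imdct_step3_inner_r_loop.ret17] span [Vorbis.L.textLo, Vorbis.L.textHi] side (v_side)
  · have hun : ShadowUntouched ue.mem s_1059b5.mem := by v_untouched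
    exact hAl.accSmall hsh.inv hun _ 4 (by decide) (by u_omega) (by u_omega)
  try clear w_zmm
  -- 0x1059cd chk18: `A[1]` = `[rbx + 4]`, C line 2511; the walk stops at `ret18`
  u_walk hcode [hμ.vendor] until [Vorbis.L.imdct_step3_inner_r_loop.ret18] span [Vorbis.L.textLo, Vorbis.L.textHi] side (v_side)
  · have hun : ShadowUntouched ue.mem s_1059cd.mem := by v_untouched
    exact hAl.accSmall hsh.inv hun _ 4 (by decide) (by u_omega) (by u_omega)
  try clear w_zmm
  -- the stores `e2[-4]`, `e2[-5]` (C lines 2511, 2512), `A += k1` (0x105a09, C line 2514), then 0x105a11 chk19: `e0[-6]` = `[r12 - 18H]`, C line 2516 `k00_20 = e0[-6] - e2[-6]`; the walk stops at `ret19`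
  u_walk hcode [hμ.vendor] until [Vorbis.L.imdct_step3_inner_r_loop.ret19] span [Vorbis.L.textLo, Vorbis.L.textHi] side (v_side)
  · have hun : ShadowUntouched ue.mem s_105a11.mem := by v_untouched
    exact hlive.accSmall hsh.inv hun _ 4 (by decide) (by u_omega) (by u_omega)
  try clear w_zmm
  -- 0x105a27 chk20: `e2[-6]` = `[rbp - 18H]`, C line 2516; the walk stops at `ret20`
  u_walk hcode [hμ.vendor] until [Vorbis.L.imdct_step3_inner_r_loop.ret20] span [Vorbis.L.textLo, Vorbis.L.textHi] side (v_side)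
  · have hun : ShadowUntouched ue.mem s_105a27.mem := by v_untouched
    exact hlive.accSmall hsh.inv hun _ 4 (by decide) (by u_omega) (by u_omega)
  try clear w_zmm
  -- 0x105a4c chk21: `e0[-7]` = `[r12 - 1CH]`, C line 2517 `k01_21 = e0[-7] - e2[-7]`; the walk stops at `ret21`
  u_walk hcode [hμ.vendor] until [Vorbis.L.imdct_step3_inner_r_loop.ret21] span [Vorbis.L.textLo, Vorbis.L.textHi] side (v_side)
  · have hun : ShadowUntouched ue.mem s_105a4c.mem := by v_untouched
    exact hlive.accSmall hsh.inv hun _ 4 (by decide) (by u_omega) (by u_omega)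
  try clear w_zmm
  -- 0x105a5a chk22: `e2[-7]` = `[rbp - 1CH]`, C line 2517; the walk stops at `ret22`
  u_walk hcode [hμ.vendor] until [Vorbis.L.imdct_step3_inner_r_loop.ret22] span [Vorbis.L.textLo, Vorbis.L.textHi] side (v_side)
  · have hun : ShadowUntouched ue.mem s_105a5a.mem := by v_untouched
    exact hlive.accSmall hsh.inv hun _ 4 (by decide) (by u_omega) (by u_omega)
  try clear w_zmm
  -- the stores `e0[-6]`, `e0[-7]` (C lines 2518, 2519), then 0x105a96 chk23: `A[0]` = `[rbx + r13]` (quarter 3), C line 2520 `e2[-6] = k00_20 * A[0] - k01_21 * A[1]`; the walk stops at `ret23`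
  u_walk hcode [hμ.vendor] until [Vorbis.L.imdct_step3_inner_r_loop.ret23] span [Vorbis.L.textLo, Vorbis.L.textHi] side (v_side)
  · have hun : ShadowUntouched ue.mem s_105a96.mem := by v_untouched
    exact hAl.accSmall hsh.inv hun _ 4 (by decide) (by u_omega) (by u_omega)
  try clear w_zmm
  -- 0x105aae chk24: `A[1]` = `[rbx + r13 + 4]`, C line 2520; the walk stops at `ret24`
  u_walk hcode [hμ.vendor] until [Vorbis.L.imdct_step3_inner_r_loop.ret24] span [Vorbis.L.textLo, Vorbis.L.textHi] side (v_side)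
  · have hun : ShadowUntouched ue.mem s_105aae.mem := by v_untouched
    exact hAl.accSmall hsh.inv hun _ 4 (by decide) (by u_omega) (by u_omega)
  try clear w_zmm
  -- the last stage: the stores `e2[-6]`, `e2[-7]` (C lines 2520, 2521), `e0 -= 8`, `e2 -= 8`, `A += k1`, `--i`, to `loop1`
  u_walk hcode [hμ.vendor] until [Vorbis.L.imdct_step3_inner_r_loop.loop1] span [Vorbis.L.textLo, Vorbis.L.textHi] side (v_side)
  -- the exit at `loop1` (0x105af9, C line 2488): the loop invariant with `t + 1`, no quarter done
  obtain ⟨⟨e_ret, e_r15, e_r14, e_r13, e_r12, e_rbp, e_rbx⟩, e_k1, e_same, e_shadow⟩ :=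
    Vorbis.Spec.imdct_step3_inner_r_loop_3.exit_mem ue v s_105af5 len i0 koff k1 t ret
      _ _ _ _ _ _ _ _ _ _ _ _ _ _ _ _ _ _ _ _ _ _ _ _
      he_room he_top hwe1 hwe2 hwe3' htlt hhi hlo hk0 he0 he2 hsame hshadow sret s15 s14 s13 s12 sbp sbx hk1slot w_mem
  refine ReachVia.done ⟨w_rip, ⟨⟨he0', hpre0, w_eq, ?abi, ⟨w_rsp, e_ret, e_r15, e_r14, e_r13, e_r12, e_rbp, e_rbx⟩, ?same,
    e_shadow⟩, ?le, ?cnt, ?e0, ?e2, ?A, e_k1⟩⟩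
  case abi => v_inv
  case same =>
    simp only [X86.User.Spec.footprint, imdct_step3_inner_r_loop.spec_frame, imdct_step3_inner_r_loop.spec_writes]
    exact e_same
  case le => omega
  case cnt =>
    exact Vorbis.Spec.imdct_step3_inner_r_loop_3.exit_cnt ue v s_105af5 t hn31 hcnt htlt w_r15
  case e0 =>
    -- `sub r12, 20H` (0x105aea, C line 2523 `e0 -= 8`)
    rw [w_r12]
    u_omega
  case e2 =>
    -- `sub rbp, 20H` (0x105aee, C line 2524 `e2 -= 8`)
    rw [w_rbp]
    u_omega
  case A =>
    -- `add rbx, r13` twice (0x105a09, 0x105af2, C lines 2514, 2526 `A += k1`)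
    rw [w_rbx, hmul4]
    u_omega
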